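-- pv_equiv track=rewrite | github.com/Srivatsav-Busi/US-Agentic-market-prediction-Swarm-agents | src/market_direction_dashboard/memory/stores.py | _trim_unique_recent
-- ===== SOURCE A (Python) =====
-- def _trim_unique_recent(values: list[str], cap: int) -> list[str]:
--     seen: set[str] = set()
--     ordered: list[str] = []
--     for raw in reversed(list(values or [])):
--         value = str(raw).strip()
--         if not value or value in seen:
--             continue
--         seen.add(value)
--         ordered.append(value)
--         if len(ordered) >= cap:
--             break
--     return list(reversed(ordered))
-- ===== SOURCE B (Python) =====
-- def _trim_unique_recent(values: list[str], cap: int) -> list[str]: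
--     if cap <= 0:
--         return []
--     last: dict[str, None] = {}
--     for raw in values or []:
--         value = str(raw).strip()
--         if value:
--             last.pop(value, None)
--             last[value] = None
--     return list(last)[-cap:]
-- ===== Notes on version B (the rewrite author's own statement) =====
-- stated objective: simpler
-- what changed: Replaces A's reversed scan with a seen-set and early break by a single forward pass over a dict that deletes and re-inserts on repeats (so keys end in last-occurrence order) followed by one [-cap:] suffix slice, with an early return of [] for non-positive cap.
-- intended difference: For cap <= 0 together with at least one value that strips to a non-empty string, A returns a one-element list (its break test fires only after the first append), while B returns [], the intended result of keeping at most a non-positive number of items. — e.g. on _trim_unique_recent(["a"], 0): A returns ["a"], B returns []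
import Mathlib
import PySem

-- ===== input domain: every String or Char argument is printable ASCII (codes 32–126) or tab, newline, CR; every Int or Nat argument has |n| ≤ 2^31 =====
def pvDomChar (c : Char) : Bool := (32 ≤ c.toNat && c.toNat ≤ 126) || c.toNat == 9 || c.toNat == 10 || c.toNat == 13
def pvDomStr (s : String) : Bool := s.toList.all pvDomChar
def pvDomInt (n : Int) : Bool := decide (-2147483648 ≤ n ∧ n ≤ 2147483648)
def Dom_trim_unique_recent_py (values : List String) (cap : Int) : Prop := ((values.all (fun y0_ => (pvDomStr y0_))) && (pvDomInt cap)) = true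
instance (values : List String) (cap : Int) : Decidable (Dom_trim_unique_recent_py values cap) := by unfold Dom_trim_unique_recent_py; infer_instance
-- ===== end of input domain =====

-- B replaces A's reversed scan with a seen-set and early break by one forward pass over a
-- dict that deletes and re-inserts on repeats, then one suffix slice; B returns [] for
-- non-positive cap where A returns one element (stated as an intended difference D_ below).

-- ===== PORT A =====
-- the 'for raw in reversed(...)' loop with 'seen'/'ordered' state and the 'break' on len(ordered) >= cap
def trimA_loop (cap : Int) : List String → PySem.Set String → List String → List String
  | [], _, ordered => ordered
  | raw :: rest, seen, ordered =>
    let value := PySem.Str.strip raw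
    if value = "" ∨ PySem.Set.contains seen value = true then
      trimA_loop cap rest seen ordered
    else
      let ordered' := ordered ++ [value]
      if cap ≤ (ordered'.length : Int) then ordered'
      else trimA_loop cap rest (PySem.Set.add seen value) ordered'

def trim_unique_recent_py (values : List String) (cap : Int) : List String :=
  (trimA_loop cap values.reverse PySem.Set.empty []).reverse

-- ===== PORT B =====
-- 'last.pop(value, None)' removes the key if present and discards the value: ported as Dict.erase
def trim_unique_recent_py_alt (values : List String) (cap : Int) : List String :=
  if cap ≤ 0 then []
  else
    let last := values.foldl
      (fun d raw =>
        let value := PySem.Str.strip raw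
        if value ≠ "" then ((d.erase value).insert value ()) else d)
      (PySem.Dict.empty : PySem.Dict String Unit)
    PySem.List.slice last.keys (some (-cap)) none

-- ===== PRECONDITION & SPEC =====
-- For cap ≤ 0 together with at least one value that strips to a non-empty string, A returns a
-- one-element list (its break test fires only after the first append), while B returns [],
-- the intended result of keeping at most a non-positive number of items.
def D_trim_unique_recent_py (values : List String) (cap : Int) : Prop :=
  cap ≤ 0 ∧ ∃ raw ∈ values, PySem.Str.strip raw ≠ ""
instance (values : List String) (cap : Int) : Decidable (D_trim_unique_recent_py values cap) := by unfold D_trim_unique_recent_py; infer_instance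

def Spec_trim_unique_recent_py (values : List String) (cap : Int) (out : List String) : Prop := ¬ D_trim_unique_recent_py values cap → out = trim_unique_recent_py_alt values cap
instance (values : List String) (cap : Int) (out : List String) : Decidable (Spec_trim_unique_recent_py values cap out) := by unfold Spec_trim_unique_recent_py; infer_instance

def pvDiffWitness_trim_unique_recent_py : List String × Int := (["a"], 0)
def pvDiffWitnessOut_trim_unique_recent_py : (List String) × (List String) := (["a"], [])

-- ===== CLAIM (what is proved, stated in full; the proofs are below) =====
def Claim_unchanged_trim_unique_recent_py : Prop := ∀ (values : List String) (cap : Int), Dom_trim_unique_recent_py values cap → Spec_trim_unique_recent_py values cap (trim_unique_recent_py values cap)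
def Claim_changed_trim_unique_recent_py : Prop := Dom_trim_unique_recent_py (pvDiffWitness_trim_unique_recent_py.1) (pvDiffWitness_trim_unique_recent_py.2) ∧ D_trim_unique_recent_py (pvDiffWitness_trim_unique_recent_py.1) (pvDiffWitness_trim_unique_recent_py.2) ∧ trim_unique_recent_py (pvDiffWitness_trim_unique_recent_py.1) (pvDiffWitness_trim_unique_recent_py.2) = pvDiffWitnessOut_trim_unique_recent_py.1 ∧ trim_unique_recent_py_alt (pvDiffWitness_trim_unique_recent_py.1) (pvDiffWitness_trim_unique_recent_py.2) = pvDiffWitnessOut_trim_unique_recent_py.2 ∧ pvDiffWitnessOut_trim_unique_recent_py.1 ≠ pvDiffWitnessOut_trim_unique_recent_py.2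
def Claim_exact_trim_unique_recent_py : Prop := ∀ (values : List String) (cap : Int), Dom_trim_unique_recent_py values cap → D_trim_unique_recent_py values cap → trim_unique_recent_py values cap ≠ trim_unique_recent_py_alt values cap

-- ===== LEMMAS AND PROOFS =====

-- model: unique values of an (already stripped) list ordered by LAST occurrence,
-- empty strings and members of the exclusion list `ex` dropped
def pvCore (ex : List String) : List String → List String
  | [] => []
  | v :: rest => if v = "" ∨ v ∈ ex ∨ v ∈ rest then pvCore ex rest else v :: pvCore ex rest

-- ---- A's side ----

-- model of A's scan of the reversed list: keep FIRST occurrences not in `seen`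
def pvDfe (seen : List String) : List String → List String
  | [] => []
  | v :: rest => if v = "" ∨ v ∈ seen then pvDfe seen rest else v :: pvDfe (v :: seen) rest

def pvDfeSeen (seen : List String) : List String → List String
  | [] => seen
  | v :: rest => if v = "" ∨ v ∈ seen then pvDfeSeen seen rest else pvDfeSeen (v :: seen) rest

theorem pvDfe_append (ex xs ys : List String) :
    pvDfe ex (xs ++ ys) = pvDfe ex xs ++ pvDfe (pvDfeSeen ex xs) ys := by
  induction xs generalizing ex with
  | nil => simp [pvDfe, pvDfeSeen]
  | cons v rest ih =>
    by_cases h : v = "" ∨ v ∈ ex <;> simp [pvDfe, pvDfeSeen, h, ih]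

theorem pvMem_dfeSeen (ex xs : List String) (w : String) :
    w ∈ pvDfeSeen ex xs ↔ w ∈ ex ∨ (w ≠ "" ∧ w ∈ xs) := by
  induction xs generalizing ex with
  | nil => simp [pvDfeSeen]
  | cons v rest ih =>
    by_cases h : v = "" ∨ v ∈ ex
    · rw [pvDfeSeen, if_pos h, ih]
      constructor
      · rintro (hw | hw)
        · exact Or.inl hw
        · exact Or.inr ⟨hw.1, List.mem_cons_of_mem _ hw.2⟩
      · rintro (hw | ⟨hne, hw⟩)
        · exact Or.inl hw
        · rcases List.mem_cons.mp hw with rfl | hw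
          · rcases h with h | h
            · exact absurd h hne
            · exact Or.inl h
          · exact Or.inr ⟨hne, hw⟩
    · push Not at h
      rw [pvDfeSeen, if_neg (by simp [h.1, h.2] : ¬ (v = "" ∨ v ∈ ex)), ih]
      constructor
      · rintro (hw | hw)
        · rcases List.mem_cons.mp hw with rfl | hw
          · exact Or.inr ⟨h.1, List.mem_cons_self⟩
          · exact Or.inl hw
        · exact Or.inr ⟨hw.1, List.mem_cons_of_mem _ hw.2⟩
      · rintro (hw | ⟨hne, hw⟩)
        · exact Or.inl (List.mem_cons_of_mem _ hw)
        · rcases List.mem_cons.mp hw with rfl | hw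
          · exact Or.inl List.mem_cons_self
          · exact Or.inr ⟨hne, hw⟩

theorem pvDfe_reverse (ex l : List String) :
    pvDfe ex l.reverse = (pvCore ex l).reverse := by
  induction l with
  | nil => simp [pvDfe, pvCore]
  | cons v rest ih =>
    have hrev : (v :: rest).reverse = rest.reverse ++ [v] := by simp
    rw [hrev, pvDfe_append, ih]
    by_cases h : v = "" ∨ v ∈ ex ∨ v ∈ rest
    · have hmem : v = "" ∨ v ∈ pvDfeSeen ex rest.reverse := by
        rcases h with h | h | h
        · exact Or.inl h
        · exact Or.inr ((pvMem_dfeSeen _ _ _).mpr (Or.inl h))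
        · by_cases hv : v = ""
          · exact Or.inl hv
          · exact Or.inr ((pvMem_dfeSeen _ _ _).mpr (Or.inr ⟨hv, by simpa using h⟩))
      rw [pvCore, if_pos h]
      simp [pvDfe, hmem]
    · push Not at h
      have hmem : ¬ (v = "" ∨ v ∈ pvDfeSeen ex rest.reverse) := by
        rintro (hv | hv)
        · exact h.1 hv
        · rcases (pvMem_dfeSeen _ _ _).mp hv with hv | ⟨_, hv⟩
          · exact h.2.1 hv
          · exact h.2.2 (by simpa using hv)
      rw [pvCore, if_neg (by tauto)]
      simp [pvDfe, hmem]

-- characterisation of A's loop: already-collected `ordered` plus up to max(cap - |ordered|, 1)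
-- further first occurrences of the reversed scan
theorem pvAloop_spec (xs : List String) :
    ∀ (seen : PySem.Set String) (sl ordered : List String) (cap : Int),
      (∀ w, PySem.Set.contains seen w = true ↔ w ∈ sl) →
      (ordered = [] ∨ (ordered.length : Int) < cap) →
      trimA_loop cap xs seen ordered
        = ordered ++ (pvDfe sl (xs.map PySem.Str.strip)).take (max (cap - ordered.length) 1).toNat := by
  induction xs with
  | nil => intro seen sl ordered cap hseen hord; simp [trimA_loop, pvDfe]
  | cons raw rest ih =>
    intro seen sl ordered cap hseen hord
    rw [trimA_loop]
    simp only [List.map_cons, pvDfe]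
    by_cases h : PySem.Str.strip raw = "" ∨ PySem.Str.strip raw ∈ sl
    · have h' : PySem.Str.strip raw = "" ∨ PySem.Set.contains seen (PySem.Str.strip raw) = true := by
        rcases h with h | h
        · exact Or.inl h
        · exact Or.inr ((hseen _).mpr h)
      rw [if_pos h', if_pos h]
      exact ih seen sl ordered cap hseen hord
    · push Not at h
      have h' : ¬ (PySem.Str.strip raw = "" ∨ PySem.Set.contains seen (PySem.Str.strip raw) = true) := by
        rintro (hv | hv)
        · exact h.1 hv
        · exact h.2 ((hseen _).mp hv)
      have hns : ¬ (PySem.Str.strip raw = "" ∨ PySem.Str.strip raw ∈ sl) := by tauto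
      rw [if_neg h', if_neg hns]
      by_cases hb : cap ≤ ((ordered ++ [PySem.Str.strip raw]).length : Int)
      · rw [if_pos hb]
        have hk : (max (cap - ordered.length) 1).toNat = 1 := by
          simp at hb; omega
        rw [hk]
        simp [List.take]
      · rw [if_neg hb]
        have hlen : ((ordered ++ [PySem.Str.strip raw]).length : Int) < cap := by omega
        have hseen' : ∀ w, PySem.Set.contains (PySem.Set.add seen (PySem.Str.strip raw)) w = true
            ↔ w ∈ PySem.Str.strip raw :: sl := by
          intro w
          have : PySem.Set.contains (PySem.Set.add seen (PySem.Str.strip raw)) w = true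
              ↔ w ∈ PySem.Set.add seen (PySem.Str.strip raw) := by
            simp [PySem.Set.contains]
          rw [this, PySem.Set.mem_add]
          constructor
          · rintro (hw | rfl)
            · exact List.mem_cons_of_mem _ ((hseen w).mp (by simpa [PySem.Set.contains] using hw))
            · exact List.mem_cons_self
          · intro hw
            rcases List.mem_cons.mp hw with rfl | hw
            · exact Or.inr rfl
            · exact Or.inl (by simpa [PySem.Set.contains] using (hseen w).mpr hw)
        rw [ih _ _ _ cap hseen' (Or.inr hlen)]
        have hlen' : (ordered.length : Int) + 1 < cap := by simpa using hlen
        have hk1 : (max (cap - ordered.length) 1).toNat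
            = ((max (cap - ((ordered ++ [PySem.Str.strip raw]).length : Int)) 1).toNat) + 1 := by
          simp; omega
        rw [hk1, List.take_succ_cons]
        simp

-- A in closed form: reversed take of the reversed keep-last list
theorem pvA_closed (values : List String) (cap : Int) :
    trim_unique_recent_py values cap
      = (((pvCore [] (values.map PySem.Str.strip)).reverse).take (max cap 1).toNat).reverse := by
  rw [trim_unique_recent_py,
      pvAloop_spec values.reverse PySem.Set.empty [] [] cap
        (by intro w; simp [PySem.Set.contains, PySem.Set.empty]) (Or.inl rfl)]
  rw [show values.reverse.map PySem.Str.strip = (values.map PySem.Str.strip).reverse by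
        simp [List.map_reverse],
      pvDfe_reverse]
  simp

-- ---- B's side ----

-- one step of B's loop on the keys: erase filters out every occurrence, insert re-appends
theorem pvMapFst_filter (l : List (String × Unit)) (v : String) :
    (l.filter (fun p => !(p.1 == v))).map (fun p => p.1)
      = (l.map (fun p => p.1)).filter (fun k => !(k == v)) := by
  induction l with
  | nil => simp
  | cons p rest ih =>
    by_cases hp : p.1 = v <;> simp [hp, ih]

theorem pvKeys_erase_insert (d : PySem.Dict String Unit) (v : String) :
    ((d.erase v).insert v ()).keys = d.keys.filter (fun k => !(k == v)) ++ [v] := by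
  have hnc : (d.erase v).contains v = false := by
    simp [PySem.Dict.erase, PySem.Dict.contains, List.any_filter]
  rw [PySem.Dict.keys_insert_of_not_contains _ _ hnc]
  simp only [PySem.Dict.erase, PySem.Dict.keys]
  rw [pvMapFst_filter]

-- decide-level membership step used by pvB_fold
theorem pvDecide_mem_cons (k v : String) (t : List String) (hkv : k ≠ v ∨ v = "") :
    decide (k ≠ "" ∧ k ∈ v :: t) = decide (k ≠ "" ∧ k ∈ t) := by
  rw [decide_eq_decide]
  constructor
  · rintro ⟨h1, h2⟩
    rcases List.mem_cons.mp h2 with rfl | h2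
    · rcases hkv with hkv | hkv
      · exact absurd rfl hkv
      · exact absurd hkv h1
    · exact ⟨h1, h2⟩
  · rintro ⟨h1, h2⟩
    exact ⟨h1, List.mem_cons_of_mem _ h2⟩

-- B's loop on the keys: old keys occurring (non-empty) later are dropped,
-- pvCore of the stripped list is appended
theorem pvB_fold (t : List String) :
    ∀ d : PySem.Dict String Unit,
      (t.foldl
        (fun d raw =>
          let value := PySem.Str.strip raw
          if value ≠ "" then ((d.erase value).insert value ()) else d) d).keys
      = d.keys.filter (fun k => !decide (k ≠ "" ∧ k ∈ t.map PySem.Str.strip))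
          ++ pvCore [] (t.map PySem.Str.strip) := by
  induction t with
  | nil => intro d; simp [pvCore]
  | cons raw rest ih =>
    intro d
    rw [List.foldl_cons]
    simp only []
    by_cases hv : PySem.Str.strip raw = ""
    · rw [if_neg (by simp [hv])]
      rw [ih d]
      have hpred : ∀ k ∈ d.keys,
          (!decide (k ≠ "" ∧ k ∈ rest.map PySem.Str.strip))
            = (!decide (k ≠ "" ∧ k ∈ (raw :: rest).map PySem.Str.strip)) := by
        intro k _
        rw [List.map_cons, hv, pvDecide_mem_cons k "" _ (Or.inr rfl)]
      rw [List.filter_congr hpred]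
      have hcr : pvCore [] ((raw :: rest).map PySem.Str.strip)
          = pvCore [] (rest.map PySem.Str.strip) := by
        rw [List.map_cons, pvCore, if_pos (Or.inl hv)]
      rw [hcr]
    · rw [if_pos (by simp [hv])]
      rw [ih]
      rw [pvKeys_erase_insert]
      rw [List.filter_append, List.filter_filter]
      have hpred : ∀ k ∈ d.keys,
          ((!decide (k ≠ "" ∧ k ∈ rest.map PySem.Str.strip)) && (!(k == PySem.Str.strip raw)))
            = (!decide (k ≠ "" ∧ k ∈ (raw :: rest).map PySem.Str.strip)) := by
        intro k _
        by_cases hk : k = PySem.Str.strip raw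
        · subst hk
          rw [List.map_cons,
            decide_eq_true (⟨hv, List.mem_cons_self⟩ :
              PySem.Str.strip raw ≠ "" ∧
                PySem.Str.strip raw ∈ PySem.Str.strip raw :: rest.map PySem.Str.strip)]
          simp
        · rw [List.map_cons, pvDecide_mem_cons k _ _ (Or.inl hk),
            beq_eq_false_iff_ne.mpr hk]
          simp
      rw [List.filter_congr hpred]
      by_cases hmem : PySem.Str.strip raw ∈ rest.map PySem.Str.strip
      · have hsing : ([PySem.Str.strip raw].filter
            (fun k => !decide (k ≠ "" ∧ k ∈ rest.map PySem.Str.strip))) = [] := by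
          rw [List.filter_cons, decide_eq_true (⟨hv, hmem⟩ :
            PySem.Str.strip raw ≠ "" ∧ PySem.Str.strip raw ∈ rest.map PySem.Str.strip)]
          simp
        rw [hsing, List.append_nil]
        have hcr : pvCore [] ((raw :: rest).map PySem.Str.strip)
            = pvCore [] (rest.map PySem.Str.strip) := by
          rw [List.map_cons, pvCore, if_pos (Or.inr (Or.inr hmem))]
        rw [hcr]
      · have hsing : ([PySem.Str.strip raw].filter
            (fun k => !decide (k ≠ "" ∧ k ∈ rest.map PySem.Str.strip))) = [PySem.Str.strip raw] := by
          rw [List.filter_cons, decide_eq_false (fun h => hmem h.2)]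
          simp
        rw [hsing]
        have hcr : pvCore [] ((raw :: rest).map PySem.Str.strip)
            = PySem.Str.strip raw :: pvCore [] (rest.map PySem.Str.strip) := by
          rw [List.map_cons, pvCore,
            if_neg (by rintro (h | h | h); exacts [hv h, (by simp at h), hmem h])]
        rw [hcr]
        simp

-- B in closed form (for 0 < cap): the suffix of the keep-last list
theorem pvB_closed (values : List String) (cap : Int) (hcap : 0 < cap) :
    trim_unique_recent_py_alt values cap
      = (pvCore [] (values.map PySem.Str.strip)).drop
          ((pvCore [] (values.map PySem.Str.strip)).length - cap.toNat) := by
  rw [trim_unique_recent_py_alt, if_neg (by omega)]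
  simp only []
  rw [pvB_fold]
  simp [PySem.Dict.keys, PySem.Dict.empty]
  rw [show cap = ((cap.toNat : Nat) : Int) by omega,
      PySem.List.slice_from_neg_natCast _ _ (by omega)]
  congr 1

-- the keep-last list is empty iff every stripped value is empty
theorem pvCore_ne_nil (l : List String) (h : ∃ v ∈ l, v ≠ "") : pvCore [] l ≠ [] := by
  induction l with
  | nil => simp at h
  | cons v rest ih =>
    by_cases hc : v = "" ∨ v ∈ ([] : List String) ∨ v ∈ rest
    · rw [pvCore, if_pos hc]
      apply ih
      rcases h with ⟨w, hw, hwne⟩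
      rcases List.mem_cons.mp hw with rfl | hw
      · rcases hc with hc | hc | hc
        · exact absurd hc hwne
        · simp at hc
        · exact ⟨w, hc, hwne⟩
      · exact ⟨w, hw, hwne⟩
    · rw [pvCore, if_neg hc]
      simp

theorem pvCore_nil_of_all_empty (l : List String) (h : ∀ v ∈ l, v = "") : pvCore [] l = [] := by
  induction l with
  | nil => simp [pvCore]
  | cons v rest ih =>
    rw [pvCore, if_pos (Or.inl (h v List.mem_cons_self))]
    exact ih (fun w hw => h w (List.mem_cons_of_mem _ hw))

-- ===== VERDICT (by name: the statement is the Claim_ definition above) =====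
theorem trim_unique_recent_py_spec : Claim_unchanged_trim_unique_recent_py := by
  intro values cap _
  unfold Spec_trim_unique_recent_py
  intro hnd
  unfold D_trim_unique_recent_py at hnd
  push Not at hnd
  by_cases hcap : 0 < cap
  · rw [pvA_closed, pvB_closed values cap hcap]
    have hmax : max cap 1 = cap := by omega
    rw [hmax, List.take_reverse]
    simp
  · have hall : ∀ raw ∈ values, PySem.Str.strip raw = "" := by
      intro raw hr
      exact hnd (by omega) raw hr
    have hcore : pvCore [] (values.map PySem.Str.strip) = [] := by
      apply pvCore_nil_of_all_empty
      intro v hv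
      rcases List.mem_map.mp hv with ⟨raw, hr, rfl⟩
      exact hall raw hr
    rw [pvA_closed, hcore, trim_unique_recent_py_alt, if_pos (by omega)]
    simp
theorem trim_unique_recent_py_changed : Claim_changed_trim_unique_recent_py := by
  unfold Claim_changed_trim_unique_recent_py; decide
theorem trim_unique_recent_py_tight : Claim_exact_trim_unique_recent_py := by
  intro values cap _ hd
  rcases hd with ⟨hcap, raw, hr, hne⟩
  have hBnil : trim_unique_recent_py_alt values cap = [] := by
    rw [trim_unique_recent_py_alt, if_pos hcap]
  have hcore : pvCore [] (values.map PySem.Str.strip) ≠ [] :=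
    pvCore_ne_nil _ ⟨PySem.Str.strip raw, List.mem_map_of_mem hr, hne⟩
  rw [pvA_closed, hBnil]
  intro hcontra
  have hmax : (max cap 1).toNat = 1 := by omega
  rw [hmax] at hcontra
  have : ((pvCore [] (values.map PySem.Str.strip)).reverse.take 1) = [] := by
    simpa using hcontra
  rcases hrv : (pvCore [] (values.map PySem.Str.strip)).reverse with _ | ⟨x, xs⟩
  · exact hcore (by simpa using congrArg List.reverse hrv)
  · rw [hrv] at this; simp at this
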